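-- pv_equiv track=rewrite | github.com/moon088/mahjong-ai | src/data/make_label_vec.py | find_discarded_tile_position
-- ===== SOURCE A (Python) =====
-- def find_discarded_tile_position(prev_hand, current_hand):
--     # 無くなった牌を探す
--     for tile in prev_hand:
--         if tile not in current_hand:
--             discarded_tile = tile
--             break
--
--     # 無くなった牌の位置を見つける
--     position = prev_hand.index(discarded_tile)
--
--     # 14次元ベクトルを生成
--     vector = [0] * 14
--     vector[position] = 1
--
--     return vector
-- ===== SOURCE B (Python) =====
-- def find_discarded_tile_position(prev_hand, current_hand):
--     # Build the 14-slot one-hot vector directly while scanning the hand: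
--     # emit 0 per kept tile; at the first tile missing from current_hand emit 1
--     # and pad the remaining slots with zeros.  No position index is ever computed.
--     def build(rest, slots):
--         if slots == 0:
--             return []
--         if rest and rest[0] not in current_hand:
--             return [1] + [0] * (slots - 1)
--         return [0] + build(rest[1:], slots - 1)
--     return build(prev_hand, 14)
-- ===== Notes on version B (the rewrite author's own statement) =====
-- stated objective: alternative
-- what changed: B never computes a position at all: a structural recursion over prev_hand emits the 14-element one-hot vector directly during the scan (0 per kept tile, 1 plus zero padding at the first missing tile), replacing A's value search + .index re-scan + in-place mutation of a preallocated vector.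
import Mathlib
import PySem

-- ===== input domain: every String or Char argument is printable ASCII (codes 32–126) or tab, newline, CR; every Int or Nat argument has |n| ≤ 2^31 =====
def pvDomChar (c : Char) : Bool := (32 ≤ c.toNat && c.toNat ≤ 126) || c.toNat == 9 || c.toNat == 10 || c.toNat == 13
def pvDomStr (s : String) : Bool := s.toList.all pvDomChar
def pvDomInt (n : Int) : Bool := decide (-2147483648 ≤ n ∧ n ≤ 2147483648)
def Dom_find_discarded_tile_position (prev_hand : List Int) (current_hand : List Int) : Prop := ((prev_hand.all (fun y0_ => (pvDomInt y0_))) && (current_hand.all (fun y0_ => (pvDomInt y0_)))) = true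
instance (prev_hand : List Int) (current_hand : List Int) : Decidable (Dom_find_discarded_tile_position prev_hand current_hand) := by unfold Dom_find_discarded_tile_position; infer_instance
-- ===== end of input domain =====

-- B emits the 14-element one-hot vector directly during a single structural recursion
-- over prev_hand (no position index, no .index re-scan, no in-place mutation);
-- objective: alternative decomposition of the same cost.


-- ===== PORT A =====
-- A's first loop: first tile of prev_hand not in current_hand (none = Python NameError).
def pvFindDiscarded : List Int → List Int → Option Int
  | [], _ => none
  | t :: rest, cur => if !(cur.contains t) then some t else pvFindDiscarded rest cur

def find_discarded_tile_position (prev_hand : List Int) (current_hand : List Int) : List Int :=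
  match pvFindDiscarded prev_hand current_hand with
  | none => []  -- Python raises NameError here (excluded by Pre_)
  | some d =>
    match PySem.List.index? prev_hand d with
    | none => []  -- unreachable (d ∈ prev_hand)
    | some pos =>
      if pos < 14 then (List.replicate 14 (0 : Int)).set pos 1
      else []  -- Python raises IndexError here (excluded by Pre_)

-- ===== PORT B =====
-- B's recursion build(rest, slots): one-hot vector emitted during the scan.
def pvBuild (cur : List Int) : List Int → Nat → List Int
  | _, 0 => []
  | [], n + 1 => 0 :: pvBuild cur [] n
  | t :: rest, n + 1 =>
    if !(cur.contains t) then 1 :: List.replicate n 0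
    else 0 :: pvBuild cur rest n

def find_discarded_tile_position_alt (prev_hand : List Int) (current_hand : List Int) : List Int :=
  pvBuild current_hand prev_hand 14

-- ===== PRECONDITION & SPEC =====
-- Pre_ excludes exactly the inputs on which A raises: no tile of prev_hand missing from
-- current_hand (NameError), or the first missing tile at index ≥ 14 (IndexError).
def Pre_find_discarded_tile_position (prev_hand : List Int) (current_hand : List Int) : Prop :=
  ∃ x ∈ prev_hand.take 14, x ∉ current_hand

instance (prev_hand : List Int) (current_hand : List Int) : Decidable (Pre_find_discarded_tile_position prev_hand current_hand) := by unfold Pre_find_discarded_tile_position; infer_instance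

def pvWitness_find_discarded_tile_position : List Int × List Int := ([3, 5, 7], [3, 7])

def Spec_find_discarded_tile_position (prev_hand : List Int) (current_hand : List Int) (out : List Int) : Prop := out = find_discarded_tile_position_alt prev_hand current_hand
instance (prev_hand : List Int) (current_hand : List Int) (out : List Int) : Decidable (Spec_find_discarded_tile_position prev_hand current_hand out) := by unfold Spec_find_discarded_tile_position; infer_instance

-- ===== CLAIM =====
def Claim_equal_find_discarded_tile_position : Prop := ∀ (prev_hand : List Int) (current_hand : List Int), Dom_find_discarded_tile_position prev_hand current_hand → Pre_find_discarded_tile_position prev_hand current_hand → Spec_find_discarded_tile_position prev_hand current_hand (find_discarded_tile_position prev_hand current_hand)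

-- ===== LEMMAS AND PROOFS =====

theorem pvFindDiscarded_not_mem (prev cur : List Int) (d : Int)
    (h : pvFindDiscarded prev cur = some d) : d ∉ cur := by
  induction prev with
  | nil => simp [pvFindDiscarded] at h
  | cons t rest ih =>
    by_cases hc : t ∈ cur
    · simp [pvFindDiscarded, hc] at h; exact ih h
    · simp [pvFindDiscarded, hc] at h; exact h ▸ hc

-- Pre_ (restricted to the first n slots) forces A's two scans to succeed with index < n.
theorem pv_exists (prev cur : List Int) (n : Nat)
    (h : ∃ x ∈ prev.take n, x ∉ cur) :
    ∃ d k, pvFindDiscarded prev cur = some d ∧ PySem.List.index? prev d = some k ∧ k < n := by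
  induction prev generalizing n with
  | nil => simp at h
  | cons t rest ih =>
    obtain ⟨x, hx, hxc⟩ := h
    cases n with
    | zero => simp at hx
    | succ m =>
      by_cases hc : t ∈ cur
      · have hx' : x ∈ rest.take m := by
          rcases (by simpa using hx) with h1 | h1
          · exact absurd (h1 ▸ hc) hxc
          · exact h1
        obtain ⟨d, k, hd, hidx, hkm⟩ := ih m ⟨x, hx', hxc⟩
        have hdc := pvFindDiscarded_not_mem rest cur d hd
        have hne : t ≠ d := fun e => hdc (e ▸ hc)
        refine ⟨d, k + 1, by simp [pvFindDiscarded, hc, hd], ?_, by omega⟩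
        rw [PySem.List.index?_cons_of_ne _ hne, hidx]; rfl
      · refine ⟨t, 0, by simp [pvFindDiscarded, hc], ?_, by omega⟩
        rw [PySem.List.index?_cons_self]

-- When A's scans yield index k < n, B's vector-emitting recursion produces A's vector.
theorem pvBuild_eq (prev cur : List Int) (d : Int) (k n : Nat)
    (hd : pvFindDiscarded prev cur = some d)
    (hidx : PySem.List.index? prev d = some k) (hk : k < n) :
    pvBuild cur prev n = (List.replicate n (0 : Int)).set k 1 := by
  induction prev generalizing k n with
  | nil => simp [pvFindDiscarded] at hd
  | cons t rest ih =>
    cases n with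
    | zero => omega
    | succ m =>
      by_cases hc : t ∈ cur
      · simp [pvFindDiscarded, hc] at hd
        have hdc := pvFindDiscarded_not_mem rest cur d hd
        have hne : t ≠ d := fun e => hdc (e ▸ hc)
        rw [PySem.List.index?_cons_of_ne _ hne] at hidx
        cases hk' : PySem.List.index? rest d with
        | none => rw [hk'] at hidx; simp at hidx
        | some k' =>
          rw [hk'] at hidx
          have : k = k' + 1 := by simpa using hidx.symm
          subst this
          simp only [pvBuild, hc, decide_true, List.contains_eq_mem, Bool.not_true,
            Bool.false_eq_true, if_false, List.replicate_succ, List.set_cons_succ,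
            List.cons.injEq, true_and]
          exact ih k' m hd hk' (by omega)
      · simp [pvFindDiscarded, hc] at hd
        subst hd
        rw [PySem.List.index?_cons_self] at hidx
        have : k = 0 := by simpa using hidx.symm
        subst this
        simp [pvBuild, hc, List.replicate_succ]

-- ===== VERDICT =====
theorem find_discarded_tile_position_spec : Claim_equal_find_discarded_tile_position := by
  intro prev cur _ hpre
  obtain ⟨d, k, hd, hidx, hk⟩ := pv_exists prev cur 14 hpre
  unfold Spec_find_discarded_tile_position find_discarded_tile_position find_discarded_tile_position_alt
  simp only [hd, hidx, if_pos hk]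
  exact (pvBuild_eq prev cur d k 14 hd hidx hk).symm
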